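-- pv_equiv track=rewrite | github.com/CarlosBeiramar/computer-science-degree | algorithmic-laboratories2/Torneio_4/torneio4.py | visibilidade
-- ===== SOURCE A (Python) =====
-- def visibilidade(lista):
--     ant = 0
--     count = 0
--     for x in lista:
--         if x != None:
--             if x > ant:
--                 count += 1
--                 ant = x
--
--     return count
-- ===== SOURCE B (Python) =====
-- def visibilidade(lista):
--     vals = [x for x in lista if x is not None]
--
--     def rec(seg, t):
--         # number of strict records of seg w.r.t. initial threshold t,
--         # by divide and conquer
--         if not seg:
--             return 0
--         if len(seg) == 1:
--             return 1 if seg[0] > t else 0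
--         mid = len(seg) // 2
--         left, right = seg[:mid], seg[mid:]
--         return rec(left, t) + rec(right, max([t] + left))
--
--     return rec(vals, 0)
-- ===== Notes on version B (the rewrite author's own statement) =====
-- stated objective: alternative
-- what changed: B filters out None, then counts strict records by divide and conquer: split the list in half, count records of the left half against threshold t and of the right half against max([t] + left), and add -- no running (ant, count) accumulator loop.
import Mathlib
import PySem

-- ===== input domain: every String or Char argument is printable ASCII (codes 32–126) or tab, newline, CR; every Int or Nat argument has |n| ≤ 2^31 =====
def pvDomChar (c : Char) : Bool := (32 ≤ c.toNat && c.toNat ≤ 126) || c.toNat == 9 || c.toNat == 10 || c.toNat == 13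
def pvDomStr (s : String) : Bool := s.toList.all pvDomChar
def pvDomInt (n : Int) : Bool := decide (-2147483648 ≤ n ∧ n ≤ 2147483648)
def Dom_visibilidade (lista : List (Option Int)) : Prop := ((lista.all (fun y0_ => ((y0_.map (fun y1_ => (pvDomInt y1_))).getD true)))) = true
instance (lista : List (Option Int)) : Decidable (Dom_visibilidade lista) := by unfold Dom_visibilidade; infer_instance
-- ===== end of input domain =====

-- B counts the strict records by divide and conquer (split, solve halves, add) instead
-- of A's fused single loop carrying (ant, count) state; same result, alternative algorithm.

-- ===== PORT A =====
def visibilidade (lista : List (Option Int)) : Int :=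
  (lista.foldl (fun (s : Int × Int) x =>
    match x with
    | none => s
    | some v => if v > s.1 then (v, s.2 + 1) else s) ((0 : Int), (0 : Int))).2

-- ===== PORT B =====
-- rec(seg, t) from Source B: records of seg w.r.t. threshold t, by divide and conquer.
-- Python's max([t] + left) is ported as left.foldl max t (the maximum of t and left's elements).
-- rec(seg, t) from Source B: records of seg w.r.t. threshold t, by divide and conquer.
-- fuel is only a structural-termination guard (fuel ≥ seg.length always holds at the call).
-- Python's max([t] + left) is ported as left.foldl max t (the maximum of t and left's elements).
def recVis : Nat → List Int → Int → Int
  | 0, _, _ => 0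
  | _ + 1, [], _ => 0
  | _ + 1, [v], t => if v > t then 1 else 0
  | fuel + 1, a :: b :: rest, t =>
      let seg := a :: b :: rest
      let mid := seg.length / 2
      recVis fuel (seg.take mid) t + recVis fuel (seg.drop mid) ((seg.take mid).foldl max t)

def visibilidade_alt (lista : List (Option Int)) : Int :=
  recVis (lista.filterMap id).length (lista.filterMap id) 0

-- ===== PRECONDITION & SPEC =====
def Spec_visibilidade (lista : List (Option Int)) (out : Int) : Prop := out = visibilidade_alt lista
instance (lista : List (Option Int)) (out : Int) : Decidable (Spec_visibilidade lista out) := by unfold Spec_visibilidade; infer_instance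

-- ===== CLAIM (what is proved, stated in full; the proofs are below) =====
def Claim_equal_visibilidade : Prop := ∀ (lista : List (Option Int)), Dom_visibilidade lista → Spec_visibilidade lista (visibilidade lista)

-- ===== LEMMAS AND PROOFS =====

-- reference count: records of vs w.r.t. threshold t, linearly
def cnt : Int → List Int → Int
  | _, [] => 0
  | t, v :: vs => (if v > t then 1 else 0) + cnt (max t v) vs

-- A's fold over the option list equals the same fold over the filtered int list
theorem foldA_filter (lista : List (Option Int)) (s : Int × Int) :
    lista.foldl (fun (s : Int × Int) x =>
      match x with
      | none => s
      | some v => if v > s.1 then (v, s.2 + 1) else s) s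
    = (lista.filterMap id).foldl (fun (s : Int × Int) v => if v > s.1 then (v, s.2 + 1) else s) s := by
  induction lista generalizing s with
  | nil => rfl
  | cons x xs ih => cases x <;> simp [List.foldl, ih]

-- A's fused loop computes cnt
theorem foldA_cnt (vs : List Int) (t c : Int) :
    (vs.foldl (fun (s : Int × Int) v => if v > s.1 then (v, s.2 + 1) else s) (t, c)).2
    = c + cnt t vs := by
  induction vs generalizing t c with
  | nil => simp [cnt]
  | cons v vs ih =>
    by_cases h : v > t
    · have : max t v = v := max_eq_right h.le
      simp [List.foldl, cnt, h, this, ih]; ring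
    · have : max t v = t := max_eq_left (by omega)
      simp [List.foldl, cnt, h, this, ih]

-- cnt splits over append, the right part counted against the left maximum
theorem cnt_append (l r : List Int) (t : Int) :
    cnt t (l ++ r) = cnt t l + cnt (l.foldl max t) r := by
  induction l generalizing t with
  | nil => simp [cnt]
  | cons v l ih => simp [cnt, List.foldl, ih]; ring

-- B's divide and conquer computes cnt (with enough fuel)
theorem recVis_cnt (fuel : Nat) (seg : List Int) (t : Int) (h : seg.length ≤ fuel) :
    recVis fuel seg t = cnt t seg := by
  induction fuel generalizing seg t with
  | zero =>
    have : seg = [] := by cases seg <;> simp_all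
    simp [this, recVis, cnt]
  | succ fuel ih =>
    match seg with
    | [] => simp [recVis, cnt]
    | [v] => simp [recVis, cnt]
    | a :: b :: rest =>
      rw [recVis]
      have hlen : (a :: b :: rest).length = rest.length + 2 := by simp
      rw [ih _ t (by simp [List.length_take, hlen]; omega),
          ih _ _ (by simp [List.length_drop, hlen] at *; omega),
          ← cnt_append, List.take_append_drop]

-- ===== VERDICT (by name: the statement is the Claim_ definition above) =====
theorem visibilidade_spec : Claim_equal_visibilidade := by
  intro lista _
  unfold Spec_visibilidade visibilidade visibilidade_alt
  rw [foldA_filter, foldA_cnt, recVis_cnt _ _ _ le_rfl]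
  simp
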